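-- pv_equiv track=rewrite | github.com/tgsoon2002/AICLass | chess1.py | RookHasLOS
-- ===== SOURCE A (Python) =====
-- def RookHasLOS(myPieces, opponentPieces, start, target):
--     # Return true if path from start coord to target coord is clear
--     # This mean no piece (self or opponent) is obstructing the path
--     # between the starting point of the rook to the target coord
--     begin = start
--     end = target
--     coordToCheck = []
--
--     # When moving from large to small, then switch begin/end to make it
--     # easy to compute
--     if start[1] > target[1] or start[0] > target[0]:
--         begin = target
--         end = start
--
--     # Determine the direction of movement (horizontal or vertical)
--     if begin[0] == end[0]:
--         # horizontal move. generate the coordinate X,y1 X,y2...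
--         coordToCheck = [ (begin[0], y) for y in range (begin[1]+1, end[1]) ]
--
--     if begin[1] == end[1]:
--         # vertical move.  Generate the coordinate x1,Y x2,Y ...
--         coordToCheck = [ (x, begin[1]) for x in range (begin[0]+1, end[0]) ]
--     # Loop through the coordToCheck and verify against the board
--     # to make sure that it's all empty.  coordToCheck only contains coordinate
--     # between start and target and not included start or target
--     a = {**myPieces, **opponentPieces}
--     for coord in coordToCheck:
--         if coord in a:
--             return False
--
--     # Rook has a clear line of sight
--     return True
-- ===== SOURCE B (Python) =====
-- def RookHasLOS(myPieces, opponentPieces, start, target):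
--     x0, y0 = start
--     x1, y1 = target
--     if x0 == x1 and y0 != y1:
--         lo, hi = min(y0, y1), max(y0, y1)
--         for pieces in (myPieces, opponentPieces):
--             for (px, py) in pieces:
--                 if px == x0 and lo < py < hi:
--                     return False
--         return True
--     if y0 == y1 and x0 != x1:
--         lo, hi = min(x0, x1), max(x0, x1)
--         for pieces in (myPieces, opponentPieces):
--             for (px, py) in pieces:
--                 if py == y0 and lo < px < hi:
--                     return False
--         return True
--     return True
-- ===== Notes on version B (the rewrite author's own statement) =====
-- stated objective: alternative
-- what changed: B classifies the move once (same-square/diagonal -> True) and scans the pieces of both dicts for one whose coordinate lies strictly between the endpoints on the shared row/column, instead of materializing every intermediate square and probing a merged dict built from both piece dicts.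
import Mathlib
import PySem

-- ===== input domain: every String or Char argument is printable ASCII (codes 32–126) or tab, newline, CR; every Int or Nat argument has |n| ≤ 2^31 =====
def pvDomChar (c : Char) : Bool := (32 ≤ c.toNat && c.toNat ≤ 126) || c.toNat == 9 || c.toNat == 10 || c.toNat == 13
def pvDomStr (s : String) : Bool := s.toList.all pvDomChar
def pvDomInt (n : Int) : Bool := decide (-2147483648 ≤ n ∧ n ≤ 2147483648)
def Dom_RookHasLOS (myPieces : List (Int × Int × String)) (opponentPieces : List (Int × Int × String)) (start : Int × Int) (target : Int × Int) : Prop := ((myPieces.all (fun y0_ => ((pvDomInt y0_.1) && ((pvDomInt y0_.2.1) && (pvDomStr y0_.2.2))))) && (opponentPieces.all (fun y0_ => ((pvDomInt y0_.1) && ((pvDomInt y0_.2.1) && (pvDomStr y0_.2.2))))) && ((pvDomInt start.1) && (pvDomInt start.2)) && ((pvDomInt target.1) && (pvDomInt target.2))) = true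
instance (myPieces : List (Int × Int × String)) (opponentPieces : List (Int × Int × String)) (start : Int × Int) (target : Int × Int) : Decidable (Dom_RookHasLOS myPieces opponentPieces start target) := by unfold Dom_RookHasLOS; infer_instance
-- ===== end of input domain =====

-- B classifies the rook move once and scans the pieces for a blocker strictly between the endpoints,
-- instead of materializing every intermediate square and probing a merged dict (alternative decomposition).


-- ===== PORT A =====
def pvLoopA (a : PySem.Dict (Int × Int) String) : List (Int × Int) → Bool
  | [] => true
  | c :: rest => if a.contains c then false else pvLoopA a rest

def RookHasLOS (myPieces : List (Int × Int × String)) (opponentPieces : List (Int × Int × String)) (start : Int × Int) (target : Int × Int) : Bool :=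
  let p := if start.2 > target.2 ∨ start.1 > target.1 then (target, start) else (start, target)
  let bg := p.1
  let en := p.2
  let coordToCheck : List (Int × Int) :=
    if bg.1 = en.1 then (PySem.List.pyRange (bg.2 + 1) en.2 1).map (fun y => (bg.1, y)) else []
  let coordToCheck2 : List (Int × Int) :=
    if bg.2 = en.2 then (PySem.List.pyRange (bg.1 + 1) en.1 1).map (fun x => (x, bg.2)) else coordToCheck
  let a := opponentPieces.foldl (fun d q => d.insert (q.1, q.2.1) q.2.2)
            (myPieces.foldl (fun d q => d.insert (q.1, q.2.1) q.2.2) PySem.Dict.empty)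
  pvLoopA a coordToCheck2

-- ===== PORT B =====
def pvBlocksCol (x lo hi : Int) (q : Int × Int × String) : Bool :=
  q.1 == x && (decide (lo < q.2.1) && decide (q.2.1 < hi))

def pvBlocksRow (y lo hi : Int) (q : Int × Int × String) : Bool :=
  q.2.1 == y && (decide (lo < q.1) && decide (q.1 < hi))

def RookHasLOS_alt (myPieces : List (Int × Int × String)) (opponentPieces : List (Int × Int × String)) (start : Int × Int) (target : Int × Int) : Bool :=
  if start.1 = target.1 ∧ start.2 ≠ target.2 then
    !(myPieces.any (pvBlocksCol start.1 (min start.2 target.2) (max start.2 target.2)) ||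
      opponentPieces.any (pvBlocksCol start.1 (min start.2 target.2) (max start.2 target.2)))
  else if start.2 = target.2 ∧ start.1 ≠ target.1 then
    !(myPieces.any (pvBlocksRow start.2 (min start.1 target.1) (max start.1 target.1)) ||
      opponentPieces.any (pvBlocksRow start.2 (min start.1 target.1) (max start.1 target.1)))
  else true

-- ===== PRECONDITION & SPEC =====
def Spec_RookHasLOS (myPieces : List (Int × Int × String)) (opponentPieces : List (Int × Int × String)) (start : Int × Int) (target : Int × Int) (out : Bool) : Prop := out = RookHasLOS_alt myPieces opponentPieces start target
instance (myPieces : List (Int × Int × String)) (opponentPieces : List (Int × Int × String)) (start : Int × Int) (target : Int × Int) (out : Bool) : Decidable (Spec_RookHasLOS myPieces opponentPieces start target out) := by unfold Spec_RookHasLOS; infer_instance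

-- ===== CLAIM (what is proved, stated in full; the proofs are below) =====
def Claim_equal_RookHasLOS : Prop := ∀ (myPieces : List (Int × Int × String)) (opponentPieces : List (Int × Int × String)) (start : Int × Int) (target : Int × Int), Dom_RookHasLOS myPieces opponentPieces start target → Spec_RookHasLOS myPieces opponentPieces start target (RookHasLOS myPieces opponentPieces start target)

-- ===== LEMMAS AND PROOFS =====

lemma pvLoopA_eq_any (a : PySem.Dict (Int × Int) String) (cs : List (Int × Int)) :
    pvLoopA a cs = !(cs.any fun c => a.contains c) := by
  induction cs with
  | nil => simp [pvLoopA]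
  | cons c rest ih => simp only [pvLoopA, List.any_cons]; cases h : a.contains c <;> simp [ih]

lemma pvContains_foldl (l : List (Int × Int × String)) (d : PySem.Dict (Int × Int) String) (c : Int × Int) :
    (l.foldl (fun d q => d.insert (q.1, q.2.1) q.2.2) d).contains c
      = (d.contains c || l.any fun q => (q.1, q.2.1) == c) := by
  induction l generalizing d with
  | nil => simp
  | cons q l ih =>
    simp only [List.foldl_cons, List.any_cons, ih, PySem.Dict.contains_insert]
    cases h : d.contains c <;> simp only [Bool.or_true, Bool.true_or, Bool.or_false, Bool.false_or]
    rw [BEq.comm]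

lemma pvCol_any (x lo hi : Int) (l : List (Int × Int × String)) :
    (((PySem.List.pyRange (lo + 1) hi 1).map (fun y => (x, y))).any fun c => l.any fun q => (q.1, q.2.1) == c)
      = l.any (pvBlocksCol x lo hi) := by
  rw [Bool.eq_iff_iff]
  simp only [List.any_eq_true, List.mem_map, PySem.List.mem_pyRange_one, pvBlocksCol,
    beq_iff_eq, Bool.and_eq_true, decide_eq_true_eq]
  constructor
  · rintro ⟨c, ⟨y, ⟨h1, h2⟩, rfl⟩, q, hq, hqc⟩
    rw [Prod.ext_iff] at hqc; simp only at hqc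
    exact ⟨q, hq, hqc.1, by omega, by omega⟩
  · rintro ⟨q, hq, h1, h2, h3⟩
    exact ⟨(x, q.2.1), ⟨q.2.1, ⟨by omega, by omega⟩, rfl⟩, q, hq, by simp [h1]⟩

lemma pvRow_any (y lo hi : Int) (l : List (Int × Int × String)) :
    (((PySem.List.pyRange (lo + 1) hi 1).map (fun x => (x, y))).any fun c => l.any fun q => (q.1, q.2.1) == c)
      = l.any (pvBlocksRow y lo hi) := by
  rw [Bool.eq_iff_iff]
  simp only [List.any_eq_true, List.mem_map, PySem.List.mem_pyRange_one, pvBlocksRow,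
    beq_iff_eq, Bool.and_eq_true, decide_eq_true_eq]
  constructor
  · rintro ⟨c, ⟨xx, ⟨h1, h2⟩, rfl⟩, q, hq, hqc⟩
    rw [Prod.ext_iff] at hqc; simp only at hqc
    exact ⟨q, hq, hqc.2, by omega, by omega⟩
  · rintro ⟨q, hq, h1, h2, h3⟩
    exact ⟨(q.1, y), ⟨q.1, ⟨by omega, by omega⟩, rfl⟩, q, hq, by simp [h1]⟩

lemma pvEqAll (myPieces : List (Int × Int × String)) (opponentPieces : List (Int × Int × String)) (start : Int × Int) (target : Int × Int) :
    RookHasLOS myPieces opponentPieces start target = RookHasLOS_alt myPieces opponentPieces start target := by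
  obtain ⟨x0, y0⟩ := start
  obtain ⟨x1, y1⟩ := target
  have hmerge : ∀ c : Int × Int, ((opponentPieces.foldl (fun d q => d.insert (q.1, q.2.1) q.2.2)
      (myPieces.foldl (fun d q => d.insert (q.1, q.2.1) q.2.2) PySem.Dict.empty)).contains c)
      = ((myPieces ++ opponentPieces).any fun q => (q.1, q.2.1) == c) := by
    intro c
    rw [pvContains_foldl, pvContains_foldl, List.any_append]
    simp
  by_cases hx : x0 = x1 <;> by_cases hy : y0 = y1
  · -- same square
    subst hx; subst hy
    have e2 : PySem.List.pyRange (x0 + 1) x0 1 = [] := PySem.List.pyRange_one_eq_nil (by omega)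
    simp [RookHasLOS, RookHasLOS_alt, pvLoopA_eq_any, e2]
  · -- column move: x0 = x1
    subst hx
    by_cases h : y0 > y1
    · have hmin : min y0 y1 = y1 := by omega
      have hmax : max y0 y1 = y0 := by omega
      simp only [RookHasLOS, RookHasLOS_alt, pvLoopA_eq_any, hmerge, hmin, hmax,
        gt_iff_lt, lt_irrefl, or_false, h, if_true, ne_eq, hy, not_false_iff,
        and_self]
      rw [if_neg (fun hh => hy hh.symm), ← List.any_append, pvCol_any]
    · have hmin : min y0 y1 = y0 := by omega
      have hmax : max y0 y1 = y1 := by omega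
      simp only [RookHasLOS, RookHasLOS_alt, pvLoopA_eq_any, hmerge, hmin, hmax,
        gt_iff_lt, lt_irrefl, or_false, h, if_true, ne_eq, hy, not_false_iff,
        and_self, if_false]
      rw [← List.any_append, pvCol_any]
  · -- row move: y0 = y1
    subst hy
    have hx' : ¬x1 = x0 := fun hh => hx hh.symm
    by_cases h : x0 > x1
    · have hmin : min x0 x1 = x1 := by omega
      have hmax : max x0 x1 = x0 := by omega
      simp only [RookHasLOS, RookHasLOS_alt, pvLoopA_eq_any, hmerge, hmin, hmax,
        gt_iff_lt, lt_irrefl, false_or, h, if_true, ne_eq, hx, not_false_iff,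
        and_self]
      rw [if_neg (by simp), ← List.any_append, pvRow_any]
    · have hmin : min x0 x1 = x0 := by omega
      have hmax : max x0 x1 = x1 := by omega
      simp only [RookHasLOS, RookHasLOS_alt, pvLoopA_eq_any, hmerge, hmin, hmax,
        gt_iff_lt, lt_irrefl, false_or, h, if_true, ne_eq, hx, not_false_iff,
        and_self, if_false]
      rw [if_neg (by simp), ← List.any_append, pvRow_any]
  · -- diagonal: no straight line
    have hx' : ¬x1 = x0 := fun hh => hx hh.symm
    have hy' : ¬y1 = y0 := fun hh => hy hh.symm
    by_cases hs : y0 > y1 ∨ x0 > x1 <;>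
      simp [RookHasLOS, RookHasLOS_alt, pvLoopA_eq_any, hx, hy, hx', hy', hs]
-- ===== VERDICT (by name: the statement is the Claim_ definition above) =====
theorem RookHasLOS_spec : Claim_equal_RookHasLOS := by
  intro myPieces opponentPieces start target _
  unfold Spec_RookHasLOS
  exact pvEqAll myPieces opponentPieces start target
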